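-- pv_equiv track=rewrite | github.com/KatySolo/decoder | decoder.py | transform_to_number_sequence
-- ===== SOURCE A (Python) =====
-- def transform_to_number_sequence (input_string):
--     letters = {}
--     number_sequence = ""
--     pointer = 0
--     for letter in input_string.lower():
--         if letter not in letters:
--             letters[letter] = pointer
--             number_sequence += str(pointer)
--             pointer += 1
--         else:
--             number_sequence += str(letters[letter])
--     return number_sequence
-- ===== SOURCE B (Python) =====
-- def transform_to_number_sequence(input_string):
--     s = input_string.lower()
--     # a character's code is the number of distinct characters occurring
--     # strictly before its first occurrence -- no mapping table is kept
--     return ''.join(str(len(set(s[:s.index(c)]))) for c in s)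
-- ===== Notes on version B (the rewrite author's own statement) =====
-- stated objective: alternative
-- what changed: Drops A's incremental state (dict, counter, growing string) entirely: each character's code is computed independently by the closed formula len(set(s[:s.index(c)])) -- the count of distinct characters before its first occurrence -- and the pieces are joined.
import Mathlib
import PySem

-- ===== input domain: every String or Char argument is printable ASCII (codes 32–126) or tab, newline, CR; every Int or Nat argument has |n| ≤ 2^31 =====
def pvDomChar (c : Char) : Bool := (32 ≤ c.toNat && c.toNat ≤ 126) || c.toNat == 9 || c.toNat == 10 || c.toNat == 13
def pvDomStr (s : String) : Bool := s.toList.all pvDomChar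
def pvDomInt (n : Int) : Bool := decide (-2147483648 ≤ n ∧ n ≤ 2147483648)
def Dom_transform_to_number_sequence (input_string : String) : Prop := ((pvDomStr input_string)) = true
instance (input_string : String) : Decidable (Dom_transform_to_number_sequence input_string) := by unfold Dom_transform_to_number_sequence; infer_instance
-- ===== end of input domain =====

-- B drops A's incremental state (dict, counter, growing string) entirely: each character's
-- code is the count of distinct characters before its first occurrence, computed
-- independently per character and joined.  Objective: alternative (same result, no state).

-- ===== PORT A =====
-- A's loop state: letters dict, output chars so far, pointer
def tnsLoopA : List Char → PySem.Dict Char Int → List Char → Int → List Char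
  | [], _, acc, _ => acc
  | c :: rest, letters, acc, p =>
    if !(letters.contains c) then
      tnsLoopA rest (letters.insert c p) (acc ++ PySem.Int.toChars p) (p + 1)
    else
      tnsLoopA rest letters (acc ++ PySem.Int.toChars (letters.getD c 0)) p

def transform_to_number_sequence (input_string : String) : String :=
  String.mk (tnsLoopA (PySem.Chars.lower input_string.toList) PySem.Dict.empty [] 0)

-- ===== PORT B =====
-- ''.join(str(len(set(s[:s.index(c)]))) for c in s); s.index(c) never raises since c ∈ s,
-- so the totalizing `.getD 0` of index? is unreachable.
def transform_to_number_sequence_alt (input_string : String) : String :=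
  let s := PySem.Chars.lower input_string.toList
  String.mk (PySem.Chars.join [] (s.map fun c =>
    PySem.Int.toChars
      ((PySem.Set.ofList
          (PySem.List.slice s none (some (((PySem.List.index? s c).getD 0 : Nat) : Int)))).length : Int)))

-- ===== PRECONDITION & SPEC =====
def Spec_transform_to_number_sequence (input_string : String) (out : String) : Prop := out = transform_to_number_sequence_alt input_string
instance (input_string : String) (out : String) : Decidable (Spec_transform_to_number_sequence input_string out) := by unfold Spec_transform_to_number_sequence; infer_instance

-- ===== CLAIM (what is proved, stated in full; the proofs are below) =====
def Claim_equal_transform_to_number_sequence : Prop := ∀ (input_string : String), Dom_transform_to_number_sequence input_string → Spec_transform_to_number_sequence input_string (transform_to_number_sequence input_string)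

-- ===== LEMMAS AND PROOFS =====

-- (c, i) pairs of a char list with indices starting at i — the items of A's letters dict
def pairsFrom : List Char → Int → List (Char × Int)
  | [], _ => []
  | c :: S, i => (c, i) :: pairsFrom S (i + 1)

theorem pairsFrom_append_singleton : ∀ (S : List Char) (i : Int) (c : Char),
    pairsFrom (S ++ [c]) i = pairsFrom S i ++ [(c, i + S.length)] := by
  intro S
  induction S with
  | nil => intro i c; simp [pairsFrom]
  | cons d S ih =>
      intro i c
      simp [pairsFrom, ih]
      ring_nf

theorem contains_pairsFrom : ∀ (S : List Char) (i : Int) (c : Char),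
    (PySem.Dict.mk (pairsFrom S i)).contains c = decide (c ∈ S) := by
  intro S
  induction S with
  | nil => intro i c; simp [pairsFrom, PySem.Dict.contains_mk]
  | cons d S ih =>
      intro i c
      have h := ih (i + 1) c
      simp only [PySem.Dict.contains_mk] at h ⊢
      rw [show pairsFrom (d :: S) i = (d, i) :: pairsFrom S (i + 1) from rfl,
          List.any_cons, h]
      by_cases h1 : d = c
      · subst h1; simp
      · have hb : (d == c) = false := beq_eq_false_iff_ne.mpr h1
        have h1' : ¬ c = d := fun e => h1 e.symm
        simp [hb, h1']

theorem get?_pairsFrom_of_mem : ∀ (S : List Char) (i : Int) (c : Char), c ∈ S →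
    (PySem.Dict.mk (pairsFrom S i)).get? c = some (i + (List.idxOf c S : Int)) := by
  intro S
  induction S with
  | nil => intro i c h; simp at h
  | cons d S ih =>
      intro i c h
      rw [show pairsFrom (d :: S) i = (d, i) :: pairsFrom S (i + 1) from rfl,
          PySem.Dict.get?_mk_cons]
      by_cases hdc : d = c
      · subst hdc; simp [List.idxOf_cons_self]
      · have hc : c ∈ S := by
          rcases List.mem_cons.mp h with h' | h'
          · exact absurd h'.symm hdc
          · exact h'
        have hne : (d == c) = false := by simp [hdc]
        rw [hne, if_neg (by simp), ih (i + 1) c hc]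
        rw [List.idxOf_cons_ne S hdc]
        push_cast
        ring_nf

-- A's loop with dict = pairsFrom S 0, pointer = |S| produces outFn S of the rest
def outFn : List Char → List Char → List Char
  | _, [] => []
  | S, c :: rest =>
    if c ∈ S then PySem.Int.toChars (List.idxOf c S : Int) ++ outFn S rest
    else PySem.Int.toChars (S.length : Int) ++ outFn (S ++ [c]) rest

theorem tnsLoopA_eq_outFn : ∀ (rest S acc : List Char),
    tnsLoopA rest (PySem.Dict.mk (pairsFrom S 0)) acc (S.length : Int) = acc ++ outFn S rest := by
  intro rest
  induction rest with
  | nil => intro S acc; simp [tnsLoopA, outFn]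
  | cons c rest ih =>
      intro S acc
      rw [show tnsLoopA (c :: rest) (PySem.Dict.mk (pairsFrom S 0)) acc (S.length : Int)
            = if !((PySem.Dict.mk (pairsFrom S 0)).contains c) then
                tnsLoopA rest ((PySem.Dict.mk (pairsFrom S 0)).insert c (S.length : Int))
                  (acc ++ PySem.Int.toChars (S.length : Int)) ((S.length : Int) + 1)
              else
                tnsLoopA rest (PySem.Dict.mk (pairsFrom S 0))
                  (acc ++ PySem.Int.toChars ((PySem.Dict.mk (pairsFrom S 0)).getD c 0))
                  (S.length : Int) from rfl]
      by_cases hc : c ∈ S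
      · have hcont : (PySem.Dict.mk (pairsFrom S 0)).contains c = true := by
          rw [contains_pairsFrom]; simp [hc]
        rw [hcont]
        simp only [Bool.not_true, if_neg (by simp : ¬ ((false : Bool) = true))]
        have hget : (PySem.Dict.mk (pairsFrom S 0)).getD c 0 = (List.idxOf c S : Int) := by
          simp [PySem.Dict.getD, get?_pairsFrom_of_mem S 0 c hc]
        rw [hget, ih S]
        simp [outFn, hc]
      · have hcont : (PySem.Dict.mk (pairsFrom S 0)).contains c = false := by
          rw [contains_pairsFrom]; simp [hc]
        rw [hcont]
        simp only [Bool.not_false, if_true]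
        have hins : (PySem.Dict.mk (pairsFrom S 0)).insert c (S.length : Int)
            = PySem.Dict.mk (pairsFrom (S ++ [c]) 0) := by
          apply PySem.Dict.ext
          rw [PySem.Dict.items_insert_of_not_contains _ _ hcont]
          rw [pairsFrom_append_singleton]
          simp
        have hlen : ((S.length : Int) + 1) = ((S ++ [c]).length : Int) := by
          simp
        rw [hins, hlen, ih (S ++ [c])]
        simp [outFn, hc]

-- the Set.add fold only appends
theorem foldl_add_eq_append : ∀ (rest S : List Char),
    ∃ u, List.foldl PySem.Set.add S rest = S ++ u := by
  intro rest
  induction rest with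
  | nil => intro S; exact ⟨[], by simp⟩
  | cons c rest ih =>
      intro S
      rw [List.foldl_cons]
      by_cases hc : c ∈ S
      · rw [PySem.Set.add_of_mem hc]; exact ih S
      · rw [PySem.Set.add_of_not_mem hc]
        obtain ⟨u, hu⟩ := ih (S ++ [c])
        exact ⟨[c] ++ u, by simp [hu]⟩

theorem join_nil_cons (x : List Char) (l : List (List Char)) :
    PySem.Chars.join [] (x :: l) = x ++ PySem.Chars.join [] l := by
  cases l with
  | nil => simp [PySem.Chars.join_singleton, PySem.Chars.join_nil]
  | cons y rest => rw [PySem.Chars.join_cons_cons]; simp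

theorem outFn_eq_join : ∀ (rest S : List Char),
    outFn S rest = PySem.Chars.join []
      (rest.map fun c => PySem.Int.toChars (List.idxOf c (List.foldl PySem.Set.add S rest) : Int)) := by
  intro rest
  induction rest with
  | nil => intro S; simp [outFn, PySem.Chars.join_nil]
  | cons c rest ih =>
      intro S
      rw [List.map_cons, join_nil_cons, List.foldl_cons]
      by_cases hc : c ∈ S
      · rw [PySem.Set.add_of_mem hc]
        have hhead : List.idxOf c (List.foldl PySem.Set.add S rest) = List.idxOf c S := by
          obtain ⟨u, hu⟩ := foldl_add_eq_append rest S
          rw [hu, List.idxOf_append_of_mem hc]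
        rw [hhead]
        simp only [outFn, if_pos hc]
        rw [ih S]
      · rw [PySem.Set.add_of_not_mem hc]
        have hhead : List.idxOf c (List.foldl PySem.Set.add (S ++ [c]) rest) = S.length := by
          obtain ⟨u, hu⟩ := foldl_add_eq_append rest (S ++ [c])
          rw [hu]
          have hmem : c ∈ S ++ [c] := by simp
          rw [List.idxOf_append_of_mem hmem, List.idxOf_append_of_notMem hc]
          simp [List.idxOf_cons_self]
        rw [hhead]
        simp only [outFn, if_neg hc]
        rw [ih (S ++ [c])]

-- B's closed formula: the index of c in the ordered dedup of cs is the number of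
-- distinct characters in the prefix before c's first occurrence
theorem idxOf_dedup_eq_len_take (cs : List Char) (c : Char) (hc : c ∈ cs) :
    List.idxOf c (PySem.List.dedup cs)
      = (PySem.Set.ofList (cs.take (List.idxOf c cs))).length := by
  set k := List.idxOf c cs with hk
  have hklt : k < cs.length := List.idxOf_lt_length_of_mem hc
  have hnm : c ∉ cs.take k := by
    intro hmem
    have := (List.mem_take_iff_idxOf_lt hc).mp hmem
    omega
  have hdecomp : cs = cs.take k ++ c :: cs.drop (k + 1) := by
    conv_lhs => rw [← List.take_append_drop k cs]
    rw [List.drop_eq_getElem_cons hklt, List.getElem_idxOf hklt]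
  have hofu : c ∉ PySem.Set.ofList (cs.take k) := by
    rw [PySem.Set.mem_ofList]; exact hnm
  have hded : PySem.List.dedup cs
      = List.foldl PySem.Set.add (PySem.Set.ofList (cs.take k) ++ [c]) (cs.drop (k + 1)) := by
    conv_lhs => rw [hdecomp]
    rw [show PySem.List.dedup (cs.take k ++ c :: cs.drop (k + 1))
          = List.foldl PySem.Set.add [] (cs.take k ++ c :: cs.drop (k + 1)) from rfl,
        List.foldl_append, List.foldl_cons]
    rw [show List.foldl PySem.Set.add [] (cs.take k) = PySem.Set.ofList (cs.take k) from rfl,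
        PySem.Set.add_of_not_mem hofu]
  obtain ⟨u, hu⟩ := foldl_add_eq_append (cs.drop (k + 1)) (PySem.Set.ofList (cs.take k) ++ [c])
  rw [hded, hu, List.append_assoc, List.idxOf_append_of_notMem hofu]
  simp [List.idxOf_cons_self]

-- index? of a member, totalized with getD 0, is idxOf
theorem index?_getD_of_mem (cs : List Char) (c : Char) (hc : c ∈ cs) :
    (PySem.List.index? cs c).getD 0 = List.idxOf c cs := by
  rw [PySem.List.index?_eq_idxOf?]
  obtain ⟨k, hk⟩ := Option.isSome_iff_exists.mp (List.isSome_idxOf?.mpr hc)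
  rw [List.idxOf_eq_getD_idxOf?, hk]
  rfl

-- ===== VERDICT (by name: the statement is the Claim_ definition above) =====
theorem transform_to_number_sequence_spec : Claim_equal_transform_to_number_sequence := by
  intro input_string _
  unfold Spec_transform_to_number_sequence
  simp only [transform_to_number_sequence, transform_to_number_sequence_alt]
  set cs := PySem.Chars.lower input_string.toList with hcs
  have hempty : (PySem.Dict.empty : PySem.Dict Char Int) = PySem.Dict.mk (pairsFrom [] 0) := rfl
  rw [hempty]
  have hA : tnsLoopA cs (PySem.Dict.mk (pairsFrom [] 0)) [] 0 = [] ++ outFn [] cs := by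
    simpa using tnsLoopA_eq_outFn cs [] []
  rw [hA, List.nil_append, outFn_eq_join]
  congr 1
  congr 1
  have hfold : List.foldl PySem.Set.add ([] : List Char) cs = PySem.List.dedup cs := rfl
  rw [hfold]
  apply List.map_congr_left
  intro c hc
  congr 1
  rw [idxOf_dedup_eq_len_take cs c hc, index?_getD_of_mem cs c hc,
      PySem.List.slice_to_natCast]
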